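-- pv_equiv track=rewrite | github.com/zzsfornlp/zmsp | msp/zext/ie/keyword.py | _freq2range
-- ===== SOURCE A (Python) =====
-- from typing import Dict, List, Tuple
--
-- def _freq2range(freqs: List[int]) -> List[Tuple[int, int]]:
--     sorting_items = [(f,i) for i,f in enumerate(freqs)]
--     sorting_items.sort(reverse=True)
--     ranges = [None for _ in freqs]
--     prev_v, prev_idxes = None, []
--     cur_rank = 0
--     for cur_v, cur_idx in sorting_items+[(None, None)]:
--         if cur_v != prev_v:
--             # close previous ones
--             one_range = (cur_rank-len(prev_idxes), cur_rank)
--             for one_idx in prev_idxes: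
--                 assert ranges[one_idx] is None
--                 ranges[one_idx] = one_range
--             prev_idxes.clear()
--         prev_v = cur_v
--         prev_idxes.append(cur_idx)
--         cur_rank += 1
--     assert all(x is not None for x in ranges)
--     return ranges
-- ===== SOURCE B (Python) =====
-- from typing import Dict, List, Tuple
-- from collections import Counter
--
-- def _freq2range(freqs: List[int]) -> List[Tuple[int, int]]:
--     cnt = Counter(freqs)
--     ranges: Dict[int, Tuple[int, int]] = {}
--     start = 0
--     for v in sorted(cnt, reverse=True):
--         ranges[v] = (start, start + cnt[v])
--         start += cnt[v]
--     return [ranges[f] for f in freqs]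
-- ===== Notes on version B (the rewrite author's own statement) =====
-- stated objective: simpler
-- what changed: Instead of sorting every (freq,index) pair and closing tie-groups with mutable group state in one scan, B counts frequencies with Counter, walks the distinct values once in descending order to build a freq->(start,end) table, and maps the original list through that table.
import Mathlib
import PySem

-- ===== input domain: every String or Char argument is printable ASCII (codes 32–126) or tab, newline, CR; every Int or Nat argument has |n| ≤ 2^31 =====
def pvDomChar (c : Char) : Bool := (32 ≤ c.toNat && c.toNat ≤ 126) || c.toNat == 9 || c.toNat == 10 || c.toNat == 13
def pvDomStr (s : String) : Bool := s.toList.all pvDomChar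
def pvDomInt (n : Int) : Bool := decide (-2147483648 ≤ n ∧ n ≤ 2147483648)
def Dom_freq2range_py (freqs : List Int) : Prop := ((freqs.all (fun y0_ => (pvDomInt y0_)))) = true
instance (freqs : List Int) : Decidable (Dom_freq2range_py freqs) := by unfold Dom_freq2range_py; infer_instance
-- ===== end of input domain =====

-- B replaces A's sort-all-pairs-and-close-tie-groups scan by a Counter + a descending walk over the
-- distinct values building a freq→(start,end) table, then a lookup pass (objective: simpler).

-- ===== PORT A =====
-- ranges[one_idx] = one_range  (one_idx is an int index; the sentinel index None is never assigned)
def pvWriteA (rs : List (Option (Int × Int))) (oi : Option Int) (r : Int × Int) :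
    List (Option (Int × Int)) :=
  match oi with
  | some i => PySem.List.pySetD rs i (some r)
  | none => rs

-- 'for one_idx in prev_idxes: ranges[one_idx] = one_range'  (the assert always holds; no-op)
def pvCloseA (rs : List (Option (Int × Int))) (idxes : List (Option Int)) (r : Int × Int) :
    List (Option (Int × Int)) :=
  idxes.foldl (fun rs oi => pvWriteA rs oi r) rs

-- the main 'for cur_v, cur_idx in sorting_items+[(None, None)]' loop, state = (ranges, prev_v, prev_idxes, cur_rank)
def pvLoopA : List (Option Int × Option Int) → List (Option (Int × Int)) → Option Int →
    List (Option Int) → Int → List (Option (Int × Int))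
  | [], rs, _, _, _ => rs
  | (curV, curIdx) :: rest, rs, prevV, prevIdxes, curRank =>
    if curV ≠ prevV then
      pvLoopA rest (pvCloseA rs prevIdxes (curRank - prevIdxes.length, curRank)) curV
        ([] ++ [curIdx]) (curRank + 1)
    else
      pvLoopA rest rs curV (prevIdxes ++ [curIdx]) (curRank + 1)

def freq2range_py (freqs : List Int) : List (Int × Int) :=
  let sortingItems := (PySem.List.enumerate freqs).map (fun p => (p.2, p.1))
  -- sorting_items.sort(reverse=True): lexicographic tuple order, descending
  let sortedItems := PySem.List.sorted2 sortingItems (fun p => p.1) (fun p => p.2) true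
  let ranges : List (Option (Int × Int)) := freqs.map (fun _ => none)
  let final := pvLoopA (sortedItems.map (fun p => (some p.1, some p.2)) ++ [(none, none)])
      ranges none [] 0
  -- 'assert all(x is not None for x in ranges)' always holds; '.getD (0,0)' realises the Option removal
  final.map (fun o => o.getD (0, 0))

-- ===== PORT B =====
-- loop body: ranges[v] = (start, start + cnt[v]); start += cnt[v]
def pvStepB (cnt : PySem.Dict Int Int) (st : PySem.Dict Int (Int × Int) × Int) (v : Int) :
    PySem.Dict Int (Int × Int) × Int :=
  (st.1.insert v (st.2, st.2 + cnt.getD v 0), st.2 + cnt.getD v 0)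

def freq2range_py_alt (freqs : List Int) : List (Int × Int) :=
  let cnt := PySem.Dict.counter freqs
  let res := (PySem.List.sorted cnt.keys (fun x => x) true).foldl (pvStepB cnt)
      (PySem.Dict.empty, 0)
  freqs.map (fun f => res.1.getD f (0, 0))

-- ===== PRECONDITION & SPEC =====
def Spec_freq2range_py (freqs : List Int) (out : List (Int × Int)) : Prop := out = freq2range_py_alt freqs
instance (freqs : List Int) (out : List (Int × Int)) : Decidable (Spec_freq2range_py freqs out) := by unfold Spec_freq2range_py; infer_instance

-- ===== CLAIM (what is proved, stated in full; the proofs are below) =====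
def Claim_equal_freq2range_py : Prop := ∀ (freqs : List Int), Dom_freq2range_py freqs → Spec_freq2range_py freqs (freq2range_py freqs)

-- ===== LEMMAS AND PROOFS =====
-- the common value: element with frequency f gets (#greater, #greater-or-equal)
def pvRank (freqs : List Int) (f : Int) : Int × Int :=
  ((freqs.countP (fun g => decide (f < g)) : Int), (freqs.countP (fun g => decide (f ≤ g)) : Int))

theorem pv_cntP_eq_count (l : List Int) (v : Int) :
    l.countP (fun g => decide (g = v)) = l.count v := by
  induction l with
  | nil => rfl
  | cons a t ih =>
    by_cases h : a = v <;> simp [ih, h]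

theorem pv_countP_le_split (l : List Int) (v : Int) :
    l.countP (fun g => decide (v ≤ g)) = l.countP (fun g => decide (v < g)) + l.count v := by
  induction l with
  | nil => rfl
  | cons a t ih =>
    simp only [List.countP_cons, List.count_cons, ih, decide_eq_true_eq, beq_iff_eq]
    split_ifs <;> omega

theorem pv_countP_disjoint {α : Type} (l : List α) (p q : α → Bool)
    (h : ∀ x ∈ l, ¬(p x = true ∧ q x = true)) :
    l.countP (fun x => p x || q x) = l.countP p + l.countP q := by
  induction l with
  | nil => rfl
  | cons a t ih =>
    have ha := h a (by simp)
    have ht : ∀ x ∈ t, ¬(p x = true ∧ q x = true) := fun x hx => h x (by simp [hx])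
    by_cases hp : p a <;> by_cases hq : q a <;>
      simp [ih ht, hp, hq] at ha ⊢ <;> omega

theorem pv_sorted2_eq_sorted_lex (xs : List (Int × Int)) :
    PySem.List.sorted2 xs (fun p => p.1) (fun p => p.2) true
      = PySem.List.sorted xs (fun p => toLex p) true := by
  simp only [PySem.List.sorted2, PySem.List.sorted]
  congr 1
  funext acc x
  congr 1
  funext a b
  rw [Bool.eq_iff_iff]
  by_cases h1 : b.1 < a.1 <;> by_cases h2 : a.1 < b.1 <;> by_cases h3 : b.2 < a.2 <;>
    simp [h1, h2, h3, Prod.Lex.lt_iff] <;> omega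

theorem pv_loopB_stable (cnt : PySem.Dict Int Int) :
    ∀ (ks : List Int) (st : PySem.Dict Int (Int × Int) × Int) (f : Int) (d0 : Int × Int),
      f ∉ ks → ((ks.foldl (pvStepB cnt) st).1.getD f d0) = st.1.getD f d0 := by
  intro ks
  induction ks with
  | nil => intro st f d0 _; rfl
  | cons v t ih =>
    intro st f d0 hf
    simp only [List.foldl_cons]
    rw [ih _ f d0 (by simp_all), pvStepB]
    rw [PySem.Dict.getD_insert]
    simp_all

theorem pv_loopB (freqs : List Int) :
    ∀ (ks : List Int) (d : PySem.Dict Int (Int × Int)) (s : Int),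
      ks.Pairwise (· > ·) →
      (∀ v ∈ ks, (freqs.countP (fun g => decide (v < g)) : Int)
          = s + (freqs.countP (fun g => decide (v < g) && decide (g ∈ ks)) : Int)) →
      ∀ f ∈ ks,
        ((ks.foldl (pvStepB (PySem.Dict.counter freqs)) (d, s)).1.getD f (0, 0)) = pvRank freqs f := by
  intro ks
  induction ks with
  | nil => intro d s _ _ f hf; simp at hf
  | cons v t ih =>
    intro d s hpw hs f hf
    obtain ⟨hhead, htail⟩ := List.pairwise_cons.mp hpw
    have hvt : v ∉ t := fun hm => lt_irrefl v (hhead v hm)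
    have hzero : freqs.countP (fun g => decide (v < g) && decide (g ∈ v :: t)) = 0 := by
      rw [List.countP_eq_zero]
      intro g hg
      simp only [Bool.and_eq_true, decide_eq_true_eq, List.mem_cons, not_and]
      rintro hlt (rfl | hgt)
      · exact absurd hlt (lt_irrefl _)
      · exact absurd hlt (not_lt.mpr (le_of_lt (hhead g hgt)))
    have hsG : s = (freqs.countP (fun g => decide (v < g)) : Int) := by
      have := hs v (by simp)
      rw [hzero] at this
      omega
    simp only [List.foldl_cons]
    rcases eq_or_ne f v with rfl | hfv
    · rw [pv_loopB_stable _ _ _ _ _ hvt]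
      simp only [pvStepB]
      rw [PySem.Dict.getD_insert_self, PySem.Dict.getD_counter, pvRank,
        pv_countP_le_split]
      simp only [Prod.mk.injEq]
      refine ⟨by omega, by push_cast; omega⟩
    · have hft : f ∈ t := by
        rcases List.mem_cons.mp hf with rfl | h
        · exact absurd rfl hfv
        · exact h
      have hstep : pvStepB (PySem.Dict.counter freqs) (d, s) v
          = (d.insert v (s, s + (freqs.count v : Int)),
             s + (freqs.count v : Int)) := by
        simp [pvStepB, PySem.Dict.getD_counter]
      rw [hstep]
      apply ih _ _ htail _ f hft
      intro v' hv'
      have hv'v : v' < v := hhead v' hv'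
      have h1 := hs v' (by simp [hv'])
      have hsplit : freqs.countP (fun g => decide (v' < g) && decide (g ∈ v :: t))
          = freqs.count v + freqs.countP (fun g => decide (v' < g) && decide (g ∈ t)) := by
        have hcongr : ∀ g ∈ freqs, ((decide (v' < g) && decide (g ∈ v :: t)) = true
            ↔ (decide (g = v) || (decide (v' < g) && decide (g ∈ t))) = true) := by
          intro g _
          rcases eq_or_ne g v with rfl | hg
          · simp [hv'v, hvt]
          · simp [hg]
        rw [List.countP_congr hcongr, pv_countP_disjoint, pv_cntP_eq_count]
        intro g hg hand
        obtain ⟨hgv, hgt⟩ := hand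
        simp only [decide_eq_true_eq] at hgv
        simp only [Bool.and_eq_true, decide_eq_true_eq] at hgt
        exact hvt (hgv ▸ hgt.2)
      rw [h1, hsplit]
      push_cast
      omega

-- B computes the common value
theorem pv_B_eq (freqs : List Int) :
    freq2range_py_alt freqs = freqs.map (pvRank freqs) := by
  simp only [freq2range_py_alt]
  apply List.map_congr_left
  intro f hf
  have hmem : ∀ g : Int, g ∈ PySem.List.sorted (PySem.Dict.counter freqs).keys (fun x => x) true
      ↔ g ∈ freqs := by
    intro g
    rw [PySem.List.mem_sorted, PySem.Dict.keys_counter, PySem.Set.mem_ofList]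
  apply pv_loopB
  · have h1 := PySem.List.sorted_pairwise_rev (PySem.Dict.counter freqs).keys (fun x => x)
    have h2 : (PySem.List.sorted (PySem.Dict.counter freqs).keys (fun x => x) true).Nodup :=
      ((PySem.List.sorted_perm _ _ _).nodup_iff).mpr (PySem.Dict.nodup_keys_counter freqs)
    exact (h1.and h2).imp (fun h => lt_of_le_of_ne h.1 (Ne.symm h.2))
  · intro v hv
    have hcongr : ∀ g ∈ freqs, (decide (v < g) = true ↔ (decide (v < g)
        && decide (g ∈ PySem.List.sorted (PySem.Dict.counter freqs).keys (fun x => x) true)) = true) := by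
      intro g hg
      simp [hg]
    rw [← List.countP_congr hcongr]
    omega
  · exact (hmem f).mpr hf

-- the write performed for item (f, i)
def pvWr (freqs : List Int) (rs : List (Option (Int × Int))) (p : Int × Int) :
    List (Option (Int × Int)) :=
  PySem.List.pySetD rs p.2 (some (pvRank freqs p.1))

-- A's main loop, started inside a group with value v, performs exactly the chronological writes
theorem pv_loopA (freqs : List Int) :
    ∀ (its : List (Int × Int)) (rs : List (Option (Int × Int))) (v : Int)
      (idxes : List (Option Int)) (rank : Int),
      its.Pairwise (fun p q => q.1 ≤ p.1) →
      (∀ p ∈ its, p.1 ≤ v) →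
      rank = (freqs.countP (fun g => decide (v < g)) : Int) + idxes.length →
      ((idxes.length : Int) + its.countP (fun p => decide (p.1 = v)) = freqs.count v) →
      (∀ P : Int → Bool, (∀ g, P g = true → g < v) →
          freqs.countP P = its.countP (fun p => P p.1)) →
      ((freqs.length : Int) = rank + its.length) →
      pvLoopA (its.map (fun p => (some p.1, some p.2)) ++ [(none, none)]) rs (some v) idxes rank
        = its.foldl (pvWr freqs) (pvCloseA rs idxes (pvRank freqs v)) := by
  intro its
  induction its with
  | nil =>
    intro rs v idxes rank _ _ h3 h4 _ _
    simp only [List.map_nil, List.nil_append, List.foldl_nil, pvLoopA]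
    rw [if_pos (by simp)]
    have hlen : (idxes.length : Int) = (freqs.count v : Int) := by
      simpa using h4
    have hval : (rank - (idxes.length : Int), rank) = pvRank freqs v := by
      simp only [pvRank, Prod.mk.injEq, pv_countP_le_split]
      refine ⟨by omega, by push_cast; omega⟩
    rw [hval]
  | cons hd rest ih =>
    intro rs v idxes rank h1 h2 h3 h4 h5 h6
    obtain ⟨w, j⟩ := hd
    obtain ⟨hhead, htail⟩ := List.pairwise_cons.mp h1
    by_cases hwv : w = v
    · subst hwv
      simp only [List.map_cons, List.cons_append, pvLoopA]
      rw [if_neg (by simp)]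
      rw [ih _ w (idxes ++ [some j]) (rank + 1) htail
        (fun q hq => hhead q hq)
        (by simp only [List.length_append, List.length_cons, List.length_nil]; push_cast; omega)
        (by
          simp only [List.countP_cons, decide_eq_true_eq] at h4 ⊢
          simp only [List.length_append, List.length_cons, List.length_nil] at h4 ⊢
          push_cast at h4 ⊢
          omega)
        (by
          intro P hP
          have hPw : P w = false := by
            cases hPw : P w
            · rfl
            · exact absurd (hP w hPw) (lt_irrefl w)
          have := h5 P hP
          simp only [List.countP_cons, hPw] at this
          simpa using this)
        (by simp only [List.length_cons] at h6 ⊢; push_cast at h6 ⊢; omega)]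
      rw [List.foldl_cons]
      congr 1
      unfold pvCloseA
      rw [List.foldl_append]
      rfl
    · have hwlt : w < v := lt_of_le_of_ne (h2 (w, j) (by simp)) hwv
      simp only [List.map_cons, List.cons_append, pvLoopA]
      rw [if_pos (by simp [hwv])]
      have hcnt0 : ((w, j) :: rest).countP (fun p => decide (p.1 = v)) = 0 := by
        rw [List.countP_eq_zero]
        intro p hp
        rcases List.mem_cons.mp hp with rfl | hp'
        · simp; omega
        · have := hhead p hp'
          simp
          omega
      have hlen : (idxes.length : Int) = (freqs.count v : Int) := by
        rw [hcnt0] at h4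
        simpa using h4
      have hval : (rank - (idxes.length : Int), rank) = pvRank freqs v := by
        simp only [pvRank, Prod.mk.injEq, pv_countP_le_split]
        refine ⟨by omega, by push_cast; omega⟩
      rw [hval]
      simp only [List.nil_append]
      have hrank : rank = (freqs.countP (fun g => decide (w < g)) : Int) := by
        have hle : freqs.countP (fun g => decide (g ≤ w))
            = ((w, j) :: rest).countP (fun p => decide (p.1 ≤ w)) := by
          apply h5
          intro g hg
          simp only [decide_eq_true_eq] at hg
          omega
        have hall : ((w, j) :: rest).countP (fun p => decide (p.1 ≤ w))
            = ((w, j) :: rest).length := by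
          rw [List.countP_eq_length]
          intro p hp
          rcases List.mem_cons.mp hp with rfl | hp'
          · simp
          · simp only [decide_eq_true_eq]
            exact hhead p hp'
        have hsplit := List.length_eq_countP_add_countP (fun g => decide (g ≤ w)) (l := freqs)
        have hco : freqs.countP (fun a => decide ¬(decide (a ≤ w) = true))
            = freqs.countP (fun g => decide (w < g)) := by
          apply List.countP_congr
          intro g _
          simp only [decide_eq_true_eq, decide_not]
          constructor
          · intro h
            simp at h ⊢
            omega
          · intro h
            simp at h ⊢
            omega
        rw [hco] at hsplit
        rw [hle, hall] at hsplit
        simp only [List.length_cons] at h6 hsplit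
        push_cast at h6
        omega
      rw [ih _ w [some j] (rank + 1) htail
        (fun q hq => hhead q hq)
        (by simp only [List.length_cons, List.length_nil]; push_cast; omega)
        (by
          have hcw : freqs.countP (fun g => decide (g = w))
              = ((w, j) :: rest).countP (fun p => decide (p.1 = w)) := by
            apply h5
            intro g hg
            simp only [decide_eq_true_eq] at hg
            omega
          rw [pv_cntP_eq_count] at hcw
          simp only [List.countP_cons, decide_eq_true_eq, if_true, List.length_cons,
            List.length_nil] at hcw ⊢
          push_cast
          omega)
        (by
          intro P hP
          have hPw : P w = false := by
            cases hPw : P w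
            · rfl
            · exact absurd (hP w hPw) (lt_irrefl w)
          have := h5 P (fun g hg => lt_trans (hP g hg) hwlt)
          simp only [List.countP_cons, hPw] at this
          simpa using this)
        (by simp only [List.length_cons] at h6 ⊢; push_cast at h6 ⊢; omega)]
      rw [List.foldl_cons]
      rfl

-- the accumulated writes fill every slot with the common value
theorem pv_writes (freqs : List Int) :
    ∀ (ps : List (Int × Int)) (rs : List (Option (Int × Int))),
      rs.length = freqs.length →
      (∀ p ∈ ps, ∃ k : Nat, ∃ h : k < freqs.length, p = (freqs[k], (k : Int))) →
      (∀ (j : Nat) (hj : j < freqs.length),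
        (freqs[j], (j : Int)) ∈ ps ∨ rs[j]? = some (some (pvRank freqs freqs[j]))) →
      ps.foldl (pvWr freqs) rs = freqs.map (fun f => some (pvRank freqs f)) := by
  intro ps
  induction ps with
  | nil =>
    intro rs hlen _ hfill
    apply List.ext_getElem?
    intro j
    by_cases hj : j < freqs.length
    · rcases hfill j hj with h | h
      · simp at h
      · rw [List.foldl_nil, h, List.getElem?_map, List.getElem?_eq_getElem hj]
        rfl
    · rw [List.foldl_nil, List.getElem?_eq_none (by omega : rs.length ≤ j),
        List.getElem?_eq_none (by simp; omega : (freqs.map (fun f => some (pvRank freqs f))).length ≤ j)]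
  | cons p ps ih =>
    intro rs hlen hps hfill
    obtain ⟨k, hk, rfl⟩ := hps p (by simp)
    simp only [List.foldl_cons, pvWr, PySem.List.pySetD_natCast]
    apply ih
    · simp [hlen]
    · intro q hq
      exact hps q (by simp [hq])
    · intro j hj
      rcases eq_or_ne j k with rfl | hjk
      · right
        rw [List.getElem?_set_self (by omega : j < rs.length)]
      · rcases hfill j hj with h | h
        · left
          rcases List.mem_cons.mp h with heq | h'
          · exfalso
            have : (j : Int) = (k : Int) := congrArg Prod.snd heq
            omega
          · exact h'
        · right
          rw [List.getElem?_set_ne (by omega)]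
          exact h

-- A computes the common value
theorem pv_A_main (freqs : List Int) (items : List (Int × Int))
    (hpw : items.Pairwise (fun p q => q.1 ≤ p.1))
    (hcnt : ∀ P : Int → Bool, freqs.countP P = items.countP (fun p => P p.1))
    (hmemit : ∀ p ∈ items, ∃ k : Nat, ∃ h : k < freqs.length, p = (freqs[k], (k : Int)))
    (hmemall : ∀ (j : Nat) (hj : j < freqs.length), (freqs[j], (j : Int)) ∈ items)
    (hlen : items.length = freqs.length) :
    (pvLoopA (items.map (fun p => (some p.1, some p.2)) ++ [(none, none)])
        (freqs.map (fun _ => none)) none [] 0).map (fun o => o.getD (0, 0))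
      = freqs.map (pvRank freqs) := by
  cases items with
  | nil =>
    have : freqs = [] := List.eq_nil_of_length_eq_zero (by simpa using hlen.symm)
    subst this
    rfl
  | cons hd rest =>
    obtain ⟨f0, i0⟩ := hd
    obtain ⟨hhead, htail⟩ := List.pairwise_cons.mp hpw
    simp only [List.map_cons, List.cons_append, pvLoopA]
    rw [if_pos (by simp)]
    have hstep := pv_loopA freqs rest (freqs.map (fun _ => none)) f0 [some i0] 1 htail
      (fun q hq => hhead q hq)
      (by
        have h0 : freqs.countP (fun g => decide (f0 < g)) = 0 := by
          rw [hcnt (fun g => decide (f0 < g)), List.countP_eq_zero]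
          intro p hp
          rcases List.mem_cons.mp hp with rfl | hp'
          · simp
          · have := hhead p hp'
            simp
            omega
        rw [h0]
        simp)
      (by
        have hc := hcnt (fun g => decide (g = f0))
        rw [pv_cntP_eq_count] at hc
        simp only [List.countP_cons, decide_eq_true_eq, if_true, List.length_cons,
          List.length_nil] at hc ⊢
        push_cast
        omega)
      (by
        intro P hP
        have hPf : P f0 = false := by
          cases hPf : P f0
          · rfl
          · exact absurd (hP f0 hPf) (lt_irrefl f0)
        have := hcnt P
        simp only [List.countP_cons, hPf] at this
        simpa using this)
      (by
        rw [← hlen]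
        simp only [List.length_cons]
        push_cast
        omega)
    simp only [List.nil_append, pvCloseA, List.foldl_nil, zero_add] at hstep ⊢
    rw [hstep]
    show (((f0, i0) :: rest).foldl (pvWr freqs) (freqs.map (fun _ => none))).map
        (fun o => o.getD (0, 0)) = freqs.map (pvRank freqs)
    rw [pv_writes freqs ((f0, i0) :: rest) (freqs.map (fun _ => none)) (by simp)
      hmemit (fun j hj => Or.inl (hmemall j hj))]
    simp [List.map_map]

-- A computes the common value
theorem pv_A_eq (freqs : List Int) :
    freq2range_py freqs = freqs.map (pvRank freqs) := by
  simp only [freq2range_py]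
  apply pv_A_main
  · rw [pv_sorted2_eq_sorted_lex]
    exact (PySem.List.sorted_pairwise_rev _ _).imp (fun h => by
      rcases Prod.Lex.le_iff.mp h with h' | ⟨h1, _⟩
      · exact le_of_lt h'
      · exact le_of_eq h1)
  · intro P
    have hperm := PySem.List.sorted2_perm ((PySem.List.enumerate freqs).map (fun p => (p.2, p.1)))
      (fun p => p.1) (fun p => p.2) true
    rw [hperm.countP_eq, List.countP_map]
    conv_lhs => rw [← PySem.List.map_snd_enumerate freqs 0]
    rw [List.countP_map]
    rfl
  · intro p hp
    have hperm := PySem.List.sorted2_perm ((PySem.List.enumerate freqs).map (fun p => (p.2, p.1)))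
      (fun p => p.1) (fun p => p.2) true
    have := hperm.mem_iff.mp hp
    obtain ⟨q, hq, rfl⟩ := List.mem_map.mp this
    obtain ⟨k, hk, rfl⟩ := (PySem.List.mem_enumerate_iff _ _ _).mp hq
    exact ⟨k, hk, by simp⟩
  · intro j hj
    have hperm := PySem.List.sorted2_perm ((PySem.List.enumerate freqs).map (fun p => (p.2, p.1)))
      (fun p => p.1) (fun p => p.2) true
    rw [hperm.mem_iff]
    refine List.mem_map.mpr ⟨((j : Int), freqs[j]), ?_, rfl⟩
    rw [PySem.List.mem_enumerate_iff]
    exact ⟨j, hj, by simp⟩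
  · have hperm := PySem.List.sorted2_perm ((PySem.List.enumerate freqs).map (fun p => (p.2, p.1)))
      (fun p => p.1) (fun p => p.2) true
    rw [hperm.length_eq]
    simp [PySem.List.length_enumerate]

-- ===== VERDICT (by name: the statement is the Claim_ definition above) =====
theorem freq2range_py_spec : Claim_equal_freq2range_py := by
  intro freqs _
  unfold Spec_freq2range_py
  rw [pv_A_eq, pv_B_eq]
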